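-- pv_equiv track=rewrite | github.com/hauteuar/analyzer | mainframe_analyzer/modules/component_extractor.py | _classify_file_io_direction_enhanced
-- ===== SOURCE A (Python) =====
-- from typing import Dict, List, Optional, Any, Tuple
--
-- def _classify_file_io_direction_enhanced(file_operations: List[Dict]) -> Dict[str, str]:
--     """Enhanced file I/O direction classification"""
--     file_directions = {}
--
--     for op in file_operations:
--         file_name = op.get('file_name')
--         operation = op.get('operation', '').upper()
--
--         if not file_name:
--             continue
--
--         if file_name not in file_directions:
--             file_directions[file_name] = set()
--
--         # More precise operation mapping
--         if operation in ['READ', 'OPEN INPUT', 'SELECT INPUT']: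
--             file_directions[file_name].add('INPUT')
--         elif operation in ['WRITE', 'REWRITE', 'OPEN OUTPUT', 'OPEN EXTEND']:
--             file_directions[file_name].add('OUTPUT')
--         elif operation in ['OPEN I-O', 'OPEN IO']:
--             file_directions[file_name].add('INPUT_OUTPUT')
--
--     # Determine final classification
--     classifications = {}
--     for file_name, directions in file_directions.items():
--         if 'INPUT_OUTPUT' in directions or ('INPUT' in directions and 'OUTPUT' in directions):
--             classifications[file_name] = 'INPUT_OUTPUT'
--         elif 'INPUT' in directions:
--             classifications[file_name] = 'INPUT'
--         elif 'OUTPUT' in directions: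
--             classifications[file_name] = 'OUTPUT'
--         else:
--             classifications[file_name] = 'UNKNOWN'
--
--     return classifications
-- ===== SOURCE B (Python) =====
-- _OP_DIR = {
--     'READ': 'INPUT', 'OPEN INPUT': 'INPUT', 'SELECT INPUT': 'INPUT',
--     'WRITE': 'OUTPUT', 'REWRITE': 'OUTPUT', 'OPEN OUTPUT': 'OUTPUT', 'OPEN EXTEND': 'OUTPUT',
--     'OPEN I-O': 'INPUT_OUTPUT', 'OPEN IO': 'INPUT_OUTPUT',
-- }
--
-- def _merge(cur, new):
--     if cur == 'UNKNOWN':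
--         return new
--     if cur == new:
--         return cur
--     return 'INPUT_OUTPUT'
--
-- def _classify_file_io_direction_enhanced(file_operations):
--     result = {}
--     for op in file_operations:
--         file_name = op.get('file_name')
--         if not file_name:
--             continue
--         cur = result.setdefault(file_name, 'UNKNOWN')
--         direction = _OP_DIR.get(op.get('operation', '').upper())
--         if direction is not None:
--             result[file_name] = _merge(cur, direction)
--     return result
-- ===== Notes on version B (the rewrite author's own statement) =====
-- stated objective: simpler
-- what changed: B replaces A's two-pass design (accumulate a set of directions per file, then classify every set in a second loop) with a single pass that looks the operation's direction up in a table and merges it into one running label per file (UNKNOWN is bottom, INPUT_OUTPUT absorbs).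
import Mathlib
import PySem

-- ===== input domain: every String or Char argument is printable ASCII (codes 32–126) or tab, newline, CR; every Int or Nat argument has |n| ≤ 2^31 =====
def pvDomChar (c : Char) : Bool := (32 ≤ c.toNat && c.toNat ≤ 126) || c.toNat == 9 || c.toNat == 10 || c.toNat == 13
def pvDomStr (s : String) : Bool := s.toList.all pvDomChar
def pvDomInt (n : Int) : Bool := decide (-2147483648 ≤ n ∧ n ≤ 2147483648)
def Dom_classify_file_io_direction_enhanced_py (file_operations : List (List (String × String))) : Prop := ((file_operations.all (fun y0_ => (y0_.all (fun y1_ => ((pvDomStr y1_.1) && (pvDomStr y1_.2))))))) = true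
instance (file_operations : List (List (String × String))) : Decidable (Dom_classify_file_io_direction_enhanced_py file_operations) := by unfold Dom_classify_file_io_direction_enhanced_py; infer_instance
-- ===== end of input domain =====

-- B replaces A's per-file direction sets and second classification pass by one loop that
-- merges each operation's direction into a single label per file via a table lookup (objective: simpler).


-- ===== PORT A =====
-- the three operation lists of A's if/elif chain
def pvInOps : List String := ["READ", "OPEN INPUT", "SELECT INPUT"]
def pvOutOps : List String := ["WRITE", "REWRITE", "OPEN OUTPUT", "OPEN EXTEND"]
def pvIoOps : List String := ["OPEN I-O", "OPEN IO"]

-- ensure the file_name key exists (A: `if file_name not in file_directions: ... = set()`)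
def pvEnsure (fd : PySem.Dict String (PySem.Set String)) (file_name : String) :
    PySem.Dict String (PySem.Set String) :=
  if fd.contains file_name then fd else fd.insert file_name PySem.Set.empty

-- A's if/elif chain on the (uppercased) operation
def pvStepA2 (fd : PySem.Dict String (PySem.Set String)) (file_name operation : String) :
    PySem.Dict String (PySem.Set String) :=
  if operation ∈ pvInOps then
    (pvEnsure fd file_name).modify file_name PySem.Set.empty (fun s => PySem.Set.add s "INPUT")
  else if operation ∈ pvOutOps then
    (pvEnsure fd file_name).modify file_name PySem.Set.empty (fun s => PySem.Set.add s "OUTPUT")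
  else if operation ∈ pvIoOps then
    (pvEnsure fd file_name).modify file_name PySem.Set.empty (fun s => PySem.Set.add s "INPUT_OUTPUT")
  else pvEnsure fd file_name

-- one iteration of A's first loop
def pvStepA (fd : PySem.Dict String (PySem.Set String)) (op : List (String × String)) :
    PySem.Dict String (PySem.Set String) :=
  match (PySem.Dict.ofList op).get? "file_name" with
  | none => fd
  | some file_name =>
    if file_name = "" then fd
    else pvStepA2 fd file_name (PySem.Str.upper ((PySem.Dict.ofList op).getD "operation" ""))

-- A's final-classification rule for one direction set
def pvClassify (directions : PySem.Set String) : String :=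
  if PySem.Set.contains directions "INPUT_OUTPUT" ||
     (PySem.Set.contains directions "INPUT" && PySem.Set.contains directions "OUTPUT") then "INPUT_OUTPUT"
  else if PySem.Set.contains directions "INPUT" then "INPUT"
  else if PySem.Set.contains directions "OUTPUT" then "OUTPUT"
  else "UNKNOWN"

def classify_file_io_direction_enhanced_py (file_operations : List (List (String × String))) : List (String × String) :=
  let file_directions := file_operations.foldl pvStepA PySem.Dict.empty
  (file_directions.items.foldl
    (fun classifications p => classifications.insert p.1 (pvClassify p.2))
    PySem.Dict.empty).items

-- ===== PORT B =====
def pvOpDir : PySem.Dict String String := PySem.Dict.mk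
  [("READ", "INPUT"), ("OPEN INPUT", "INPUT"), ("SELECT INPUT", "INPUT"),
   ("WRITE", "OUTPUT"), ("REWRITE", "OUTPUT"), ("OPEN OUTPUT", "OUTPUT"), ("OPEN EXTEND", "OUTPUT"),
   ("OPEN I-O", "INPUT_OUTPUT"), ("OPEN IO", "INPUT_OUTPUT")]

def pvMerge (cur new : String) : String :=
  if cur = "UNKNOWN" then new
  else if cur = new then cur
  else "INPUT_OUTPUT"

-- B's body for one recognized file_name: setdefault, table lookup, merge
def pvStepB2 (result : PySem.Dict String String) (file_name operation : String) :
    PySem.Dict String String :=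
  let result1 := result.setdefault file_name "UNKNOWN"
  match pvOpDir.get? operation with
  | none => result1
  | some direction => result1.insert file_name (pvMerge (result1.getD file_name "UNKNOWN") direction)

-- one iteration of B's single loop
def pvStepB (result : PySem.Dict String String) (op : List (String × String)) :
    PySem.Dict String String :=
  match (PySem.Dict.ofList op).get? "file_name" with
  | none => result
  | some file_name =>
    if file_name = "" then result
    else pvStepB2 result file_name (PySem.Str.upper ((PySem.Dict.ofList op).getD "operation" ""))

def classify_file_io_direction_enhanced_py_alt (file_operations : List (List (String × String))) : List (String × String) :=
  (file_operations.foldl pvStepB PySem.Dict.empty).items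

-- ===== PRECONDITION & SPEC =====
def Spec_classify_file_io_direction_enhanced_py (file_operations : List (List (String × String))) (out : List (String × String)) : Prop := out = classify_file_io_direction_enhanced_py_alt file_operations
instance (file_operations : List (List (String × String))) (out : List (String × String)) : Decidable (Spec_classify_file_io_direction_enhanced_py file_operations out) := by unfold Spec_classify_file_io_direction_enhanced_py; infer_instance

-- ===== CLAIM (what is proved, stated in full; the proofs are below) =====
def Claim_equal_classify_file_io_direction_enhanced_py : Prop := ∀ (file_operations : List (List (String × String))), Dom_classify_file_io_direction_enhanced_py file_operations → Spec_classify_file_io_direction_enhanced_py file_operations (classify_file_io_direction_enhanced_py file_operations)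

-- ===== LEMMAS AND PROOFS =====

-- B's dict accumulator is A's dict accumulator with each direction set classified pointwise
def pvMapC (fd : PySem.Dict String (PySem.Set String)) : PySem.Dict String String :=
  PySem.Dict.mk (fd.items.map (fun p => (p.1, pvClassify p.2)))

theorem pvContains_mapC (fd : PySem.Dict String (PySem.Set String)) (k : String) :
    (pvMapC fd).contains k = fd.contains k := by
  simp [pvMapC, PySem.Dict.contains, List.any_map, Function.comp_def]

theorem pvGet?_mapC (fd : PySem.Dict String (PySem.Set String)) (k : String) :
    (pvMapC fd).get? k = (fd.get? k).map pvClassify := by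
  simp [pvMapC, PySem.Dict.get?, List.find?_map, Function.comp_def]

theorem pvGetD_mapC (fd : PySem.Dict String (PySem.Set String)) (k : String) :
    (pvMapC fd).getD k "UNKNOWN" = pvClassify (fd.getD k PySem.Set.empty) := by
  simp only [PySem.Dict.getD, pvGet?_mapC]
  cases fd.get? k <;> rfl

theorem pvInsert_mapC (fd : PySem.Dict String (PySem.Set String)) (k : String) (v : PySem.Set String) :
    (pvMapC fd).insert k (pvClassify v) = pvMapC (fd.insert k v) := by
  simp only [PySem.Dict.insert, pvContains_mapC]
  split
  · simp only [pvMapC, List.map_map]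
    congr 1
    apply List.map_congr_left
    intro p _
    by_cases h : p.1 == k <;> simp [Function.comp, h]
  · simp [pvMapC]

theorem pvSetdefault_mapC (fd : PySem.Dict String (PySem.Set String)) (k : String) :
    (pvMapC fd).setdefault k "UNKNOWN" = pvMapC (pvEnsure fd k) := by
  simp only [PySem.Dict.setdefault, pvContains_mapC, pvEnsure]
  split
  · rfl
  · rename_i h
    simp only [pvMapC, PySem.Dict.insert, if_neg h, List.map_append, List.map_cons, List.map_nil]
    rfl


theorem pvClassify_add (s : PySem.Set String) (d : String)
    (hd : d = "INPUT" ∨ d = "OUTPUT" ∨ d = "INPUT_OUTPUT") :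
    pvClassify (PySem.Set.add s d) = pvMerge (pvClassify s) d := by
  rcases hd with h | h | h <;> subst h <;>
    simp only [pvClassify, pvMerge, PySem.Set.contains] <;>
    by_cases hio : "INPUT_OUTPUT" ∈ s <;>
    by_cases hi : "INPUT" ∈ s <;>
    by_cases ho : "OUTPUT" ∈ s <;>
    simp [hio, hi, ho]

theorem pvOpDir_get? (o : String) :
    pvOpDir.get? o =
      (if o ∈ pvInOps then some "INPUT"
       else if o ∈ pvOutOps then some "OUTPUT"
       else if o ∈ pvIoOps then some "INPUT_OUTPUT"
       else none) := by
  simp only [pvOpDir, PySem.Dict.get?_mk_cons, pvInOps, pvOutOps, pvIoOps,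
    List.mem_cons, List.not_mem_nil, or_false]
  split_ifs <;> simp_all <;> simp_all [PySem.Dict.get?, eq_comm]

theorem pvStep2_mapC (fd : PySem.Dict String (PySem.Set String)) (name o : String) :
    pvStepB2 (pvMapC fd) name o = pvMapC (pvStepA2 fd name o) := by
  unfold pvStepA2 pvStepB2
  simp only [pvSetdefault_mapC, pvOpDir_get?, pvGetD_mapC]
  by_cases h1 : o ∈ pvInOps
  · simp only [h1, if_true]
    rw [← pvClassify_add _ _ (Or.inl rfl), pvInsert_mapC]
    rfl
  · by_cases h2 : o ∈ pvOutOps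
    · simp only [h1, h2, if_true, if_false]
      rw [← pvClassify_add _ _ (Or.inr (Or.inl rfl)), pvInsert_mapC]
      rfl
    · by_cases h3 : o ∈ pvIoOps
      · simp only [h1, h2, h3, if_true, if_false]
        rw [← pvClassify_add _ _ (Or.inr (Or.inr rfl)), pvInsert_mapC]
        rfl
      · simp only [h1, h2, h3, if_false]

theorem pvStep_mapC (fd : PySem.Dict String (PySem.Set String)) (op : List (String × String)) :
    pvStepB (pvMapC fd) op = pvMapC (pvStepA fd op) := by
  unfold pvStepA pvStepB
  rcases hname : (PySem.Dict.ofList op).get? "file_name" with _ | name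
  · rfl
  · by_cases hempty : name = ""
    · simp [hempty]
    · simp only [hempty, if_false, pvStep2_mapC]

theorem pvFold_mapC (ops : List (List (String × String))) (fd : PySem.Dict String (PySem.Set String)) :
    ops.foldl pvStepB (pvMapC fd) = pvMapC (ops.foldl pvStepA fd) := by
  induction ops generalizing fd with
  | nil => rfl
  | cons op rest ih => simp only [List.foldl_cons, pvStep_mapC, ih]

theorem pvNodup_ensure (fd : PySem.Dict String (PySem.Set String)) (name : String)
    (h : fd.keys.Nodup) : (pvEnsure fd name).keys.Nodup := by
  unfold pvEnsure
  split
  · exact h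
  · exact PySem.Dict.nodup_keys_insert _ _ _ h

theorem pvNodup_stepA (fd : PySem.Dict String (PySem.Set String)) (op : List (String × String))
    (h : fd.keys.Nodup) : (pvStepA fd op).keys.Nodup := by
  unfold pvStepA
  rcases (PySem.Dict.ofList op).get? "file_name" with _ | name
  · exact h
  · by_cases hempty : name = ""
    · simpa [hempty]
    · simp only [hempty, if_false, pvStepA2, PySem.Dict.modify]
      split_ifs <;> first
        | exact PySem.Dict.nodup_keys_insert _ _ _ (pvNodup_ensure fd name h)
        | exact pvNodup_ensure fd name h

theorem pvNodup_foldA (ops : List (List (String × String))) (fd : PySem.Dict String (PySem.Set String))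
    (h : fd.keys.Nodup) : (ops.foldl pvStepA fd).keys.Nodup := by
  induction ops generalizing fd with
  | nil => exact h
  | cons op rest ih => exact ih _ (pvNodup_stepA _ _ h)

-- A's second loop over a dict with distinct keys just maps pvClassify over the items
theorem pvSecondLoop (l : List (String × PySem.Set String)) (acc : PySem.Dict String String)
    (hnd : (l.map Prod.fst).Nodup) (hacc : ∀ p ∈ l, acc.contains p.1 = false) :
    (l.foldl (fun c p => c.insert p.1 (pvClassify p.2)) acc).items
      = acc.items ++ l.map (fun p => (p.1, pvClassify p.2)) := by
  induction l generalizing acc with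
  | nil => simp
  | cons p rest ih =>
    simp only [List.foldl_cons, List.map_cons]
    have hstep := PySem.Dict.items_insert_of_not_contains acc (pvClassify p.2) (hacc p (by simp))
    have hrec := ih (acc.insert p.1 (pvClassify p.2)) (by simpa using hnd.of_cons) (by
      intro q hq
      rw [PySem.Dict.contains_insert]
      have hne : q.1 ≠ p.1 := by
        simp only [List.map_cons, List.nodup_cons] at hnd
        intro he
        exact hnd.1 (he ▸ List.mem_map_of_mem hq)
      simp [hne, hacc q (List.mem_cons_of_mem _ hq)])
    rw [hrec, hstep]
    simp

-- ===== VERDICT (by name: the statement is the Claim_ definition above) =====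
theorem classify_file_io_direction_enhanced_py_spec : Claim_equal_classify_file_io_direction_enhanced_py := by
  intro ops _
  unfold Spec_classify_file_io_direction_enhanced_py
  unfold classify_file_io_direction_enhanced_py classify_file_io_direction_enhanced_py_alt
  have hmap : ops.foldl pvStepB PySem.Dict.empty = pvMapC (ops.foldl pvStepA PySem.Dict.empty) :=
    pvFold_mapC ops PySem.Dict.empty
  have hnd : ((ops.foldl pvStepA PySem.Dict.empty).items.map Prod.fst).Nodup :=
    pvNodup_foldA ops PySem.Dict.empty (by simp [PySem.Dict.keys_empty])
  rw [pvSecondLoop _ PySem.Dict.empty hnd (fun p _ => by simp [PySem.Dict.contains_empty]),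
    hmap]
  rfl
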